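-- pv_equiv track=rewrite | github.com/retroinspect/my-second-ps | week0/10610.py | getMultipleOf30
-- ===== SOURCE A (Python) =====
-- def getMultipleOf30(N):
--     digits = [ int(x) for x in str(N)]
--
--     if 0 not in digits:
--         return -1
--
--     if sum(digits) % 3 != 0:
--         return -1
--
--     digits.sort(reverse=True)
--     return int(''.join(map(str, digits)))
-- ===== SOURCE B (Python) =====
-- def getMultipleOf30(N):
--     counts = [0] * 10
--     total = 0
--     for ch in str(N):
--         d = int(ch)
--         counts[d] += 1
--         total += d
--     if counts[0] == 0:
--         return -1
--     if total % 3 != 0: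
--         return -1
--     return int(''.join(str(d) * counts[d] for d in range(9, -1, -1)))
-- ===== Notes on version B (the rewrite author's own statement) =====
-- stated objective: alternative
-- what changed: Replaces building a digit list and comparison-sorting it (digits.sort(reverse=True)) by a counting sort: one tally pass over str(N) builds a ten-entry count table plus the digit sum, and the result string is emitted from the table highest digit first.
import Mathlib
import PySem

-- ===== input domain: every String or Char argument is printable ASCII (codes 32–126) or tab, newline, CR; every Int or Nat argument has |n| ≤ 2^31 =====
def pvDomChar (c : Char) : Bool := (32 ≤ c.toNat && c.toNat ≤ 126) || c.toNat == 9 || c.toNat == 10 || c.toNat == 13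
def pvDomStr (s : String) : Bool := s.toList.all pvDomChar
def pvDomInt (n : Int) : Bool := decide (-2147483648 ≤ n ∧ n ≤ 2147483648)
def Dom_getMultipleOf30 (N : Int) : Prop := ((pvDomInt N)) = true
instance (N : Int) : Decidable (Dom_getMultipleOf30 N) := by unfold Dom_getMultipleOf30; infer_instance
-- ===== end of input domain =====

-- B replaces A's comparison sort of the digit list by a counting sort: one tally pass over str(N)
-- builds a ten-entry count table plus the digit sum, and the answer is emitted highest digit first.

-- int(ch) for a single character ch of str(N); `none` (Python ValueError, e.g. the '-' of a
-- negative N) is excluded by Pre_, so the .getD 0 default is never reached on admitted inputs.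
def pvDigit (c : Char) : Int := (PySem.Int.ofChars? [c]).getD 0

-- ===== PORT A =====
def getMultipleOf30 (N : Int) : Int :=
  let digits := (PySem.Int.toChars N).map pvDigit
  if (digits.contains 0) = false then -1
  else if PySem.Int.mod digits.sum 3 ≠ 0 then -1
  else
    (PySem.Int.ofChars?
      (PySem.Chars.join [] ((PySem.List.sorted digits (fun x => x) true).map PySem.Int.toChars))).getD 0

-- ===== PORT B =====
def getMultipleOf30_alt (N : Int) : Int :=
  let st := (PySem.Int.toChars N).foldl
    (fun (st : List Int × Int) ch =>
      let d := pvDigit ch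
      -- counts[d] += 1 ; total += d   (0 ≤ d ≤ 9 on admitted inputs, so .toNat is exact)
      (st.1.set d.toNat (st.1.getD d.toNat 0 + 1), st.2 + d))
    (List.replicate 10 (0 : Int), (0 : Int))
  let counts := st.1
  let total := st.2
  if counts.getD 0 0 = 0 then -1
  else if PySem.Int.mod total 3 ≠ 0 then -1
  else
    (PySem.Int.ofChars?
      ((PySem.List.pyRange 9 (-1) (-1)).flatMap
        (fun d => PySem.List.pyRepeat (PySem.Int.toChars d) (counts.getD d.toNat 0)))).getD 0

-- ===== PRECONDITION & SPEC =====
-- A raises ValueError on every negative N (int('-') on the sign character of str(N)); those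
-- inputs are excluded. A returns on every N ≥ 0.
def Pre_getMultipleOf30 (N : Int) : Prop := 0 ≤ N
instance (N : Int) : Decidable (Pre_getMultipleOf30 N) := by unfold Pre_getMultipleOf30; infer_instance
def pvWitness_getMultipleOf30 : Int := 30

def Spec_getMultipleOf30 (N : Int) (out : Int) : Prop := out = getMultipleOf30_alt N
instance (N : Int) (out : Int) : Decidable (Spec_getMultipleOf30 N out) := by unfold Spec_getMultipleOf30; infer_instance

-- ===== CLAIM (what is proved, stated in full; the proofs are below) =====
def Claim_equal_getMultipleOf30 : Prop := ∀ (N : Int), Dom_getMultipleOf30 N → Pre_getMultipleOf30 N → Spec_getMultipleOf30 N (getMultipleOf30 N)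

-- ===== LEMMAS AND PROOFS =====

-- every character of Nat.toDigits 10 m is a decimal digit character
lemma mem_toDigits_digit (m : Nat) : ∀ c ∈ Nat.toDigits 10 m, ∃ k : Nat, k < 10 ∧ c = Nat.digitChar k := by
  induction m using Nat.strong_induction_on with
  | _ m ih =>
    intro c hc
    rw [Nat.toDigits_eq_if (by norm_num)] at hc
    by_cases hm : m < 10
    · rw [if_pos hm] at hc
      simp at hc
      exact ⟨m, hm, hc⟩
    · rw [if_neg hm] at hc
      rcases List.mem_append.1 hc with h | h
      · exact ih (m / 10) (Nat.div_lt_self (by omega) (by norm_num)) c h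
      · simp at h
        exact ⟨m % 10, Nat.mod_lt _ (by norm_num), h⟩

lemma pvDigit_digitChar (k : Nat) (hk : k < 10) : pvDigit (Nat.digitChar k) = (k : Int) := by
  interval_cases k <;> decide

-- all parsed digits of a nonnegative N lie in 0..9
lemma pvDigit_range (N : Int) (hN : 0 ≤ N) :
    ∀ c ∈ PySem.Int.toChars N, 0 ≤ pvDigit c ∧ pvDigit c ≤ 9 := by
  intro c hc
  rw [PySem.Int.toChars, if_neg (by omega)] at hc
  obtain ⟨k, hk, rfl⟩ := mem_toDigits_digit _ c hc
  rw [pvDigit_digitChar k hk]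
  constructor <;> [positivity; exact_mod_cast Nat.lt_succ_iff.1 hk]

-- B's single fold is a counts fold plus the digit sum
lemma foldB (cs : List Char) (acc : List Int) (t : Int) :
    cs.foldl
      (fun (st : List Int × Int) ch =>
        let d := pvDigit ch
        (st.1.set d.toNat (st.1.getD d.toNat 0 + 1), st.2 + d)) (acc, t)
    = (cs.foldl (fun acc ch => acc.set (pvDigit ch).toNat (acc.getD (pvDigit ch).toNat 0 + 1)) acc,
       t + (cs.map pvDigit).sum) := by
  induction cs generalizing acc t with
  | nil => simp
  | cons c cs ih => simp only [List.foldl_cons, List.map_cons, List.sum_cons, ih]; ring_nf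

-- the counts fold tallies exactly the multiset of parsed digits
lemma counts_getD (cs : List Char) (h : ∀ c ∈ cs, 0 ≤ pvDigit c ∧ pvDigit c ≤ 9)
    (acc : List Int) (hlen : acc.length = 10) (j : Nat) (hj : j < 10) :
    (cs.foldl (fun acc ch => acc.set (pvDigit ch).toNat (acc.getD (pvDigit ch).toNat 0 + 1)) acc).getD j 0
      = acc.getD j 0 + ((cs.map pvDigit).count (j : Int) : Int) := by
  induction cs generalizing acc with
  | nil => simp
  | cons c cs ih =>
    obtain ⟨h0, h9⟩ := h c (List.mem_cons_self)
    have hi : (pvDigit c).toNat < acc.length := by omega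
    rw [List.foldl_cons, ih (fun c hc => h c (List.mem_cons_of_mem _ hc)) _ (by simp [hlen])]
    rw [List.map_cons, List.count_cons]
    by_cases hcj : pvDigit c = (j : Int)
    · have hij : (pvDigit c).toNat = j := by omega
      rw [List.getD_eq_getElem?_getD, hij, List.getElem?_set_self (by omega)]
      simp [List.getD_eq_getElem?_getD, hcj]
      omega
    · have hne : (pvDigit c).toNat ≠ j := by omega
      rw [List.getD_eq_getElem?_getD, List.getElem?_set_ne hne]
      simp [List.getD_eq_getElem?_getD, hcj]

-- the counting-sort output, as an explicit list
def pvBlocks (ds : List Int) : List Int :=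
  List.replicate (ds.count 9) 9 ++ List.replicate (ds.count 8) 8 ++ List.replicate (ds.count 7) 7 ++
  List.replicate (ds.count 6) 6 ++ List.replicate (ds.count 5) 5 ++ List.replicate (ds.count 4) 4 ++
  List.replicate (ds.count 3) 3 ++ List.replicate (ds.count 2) 2 ++ List.replicate (ds.count 1) 1 ++
  List.replicate (ds.count 0) 0

lemma pvBlocks_perm (ds : List Int) (h : ∀ x ∈ ds, 0 ≤ x ∧ x ≤ 9) : (pvBlocks ds).Perm ds := by
  rw [List.perm_iff_count]
  intro v
  by_cases hv : 0 ≤ v ∧ v ≤ 9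
  · obtain ⟨h1, h2⟩ := hv
    interval_cases v <;> simp [pvBlocks, List.count_append, List.count_replicate]
  · have hz : ds.count v = 0 := List.count_eq_zero.2 (fun hmem => by have := h v hmem; omega)
    simp [pvBlocks, List.count_append, List.count_replicate, hz]
    refine ⟨?_, ?_, ?_, ?_, ?_, ?_, ?_, ?_, ?_, ?_⟩ <;> (rintro rfl; omega)

lemma rep_pairwise (a : Int) (n : Nat) (l : List Int) (hl : l.Pairwise (fun x y => y ≤ x))
    (hb : ∀ x ∈ l, x ≤ a) : (List.replicate n a ++ l).Pairwise (fun x y => y ≤ x) := by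
  refine List.pairwise_append.2 ⟨List.pairwise_replicate.2 (Or.inr le_rfl), hl, ?_⟩
  intro x hx y hy
  rw [List.eq_of_mem_replicate hx]
  exact hb y hy

lemma pvBlocks_sorted (ds : List Int) : (pvBlocks ds).Pairwise (fun a b => b ≤ a) := by
  unfold pvBlocks
  simp only [List.append_assoc]
  apply rep_pairwise; apply rep_pairwise; apply rep_pairwise; apply rep_pairwise
  apply rep_pairwise; apply rep_pairwise; apply rep_pairwise; apply rep_pairwise
  apply rep_pairwise
  · exact List.pairwise_replicate.2 (Or.inr le_rfl)
  all_goals (intro x hx; simp [List.mem_append, List.mem_replicate] at hx; omega)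

-- sorted(digits, reverse=True) IS the counting-sort output
lemma sorted_eq_pvBlocks (ds : List Int) (h : ∀ x ∈ ds, 0 ≤ x ∧ x ≤ 9) :
    PySem.List.sorted ds (fun x => x) true = pvBlocks ds := by
  exact List.Perm.eq_of_pairwise (fun a b _ _ h1 h2 => le_antisymm h2 h1)
    (PySem.List.sorted_pairwise_rev ds _) (pvBlocks_sorted ds)
    ((PySem.List.sorted_perm ds _ true).trans (pvBlocks_perm ds h).symm)

-- ''.join with the empty separator is concatenation
lemma join_nil_flatten (l : List (List Char)) : PySem.Chars.join [] l = l.flatten := by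
  simp only [PySem.Chars.join, List.intercalate]
  induction l with
  | nil => rfl
  | cons x l ih => cases l <;> simp_all [List.intersperse]

-- ===== VERDICT (by name: the statement is the Claim_ definition above) =====
theorem getMultipleOf30_spec : Claim_equal_getMultipleOf30 := by
  intro N _ hpre
  unfold Spec_getMultipleOf30
  have hrange := pvDigit_range N hpre
  have hdr : ∀ x ∈ (PySem.Int.toChars N).map pvDigit, 0 ≤ x ∧ x ≤ 9 := by
    intro x hx
    obtain ⟨c, hc, rfl⟩ := List.mem_map.1 hx
    exact hrange c hc
  rw [getMultipleOf30, getMultipleOf30_alt]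
  simp only [foldB]
  have hcount : ∀ j : Nat, j < 10 →
      ((PySem.Int.toChars N).foldl
        (fun acc ch => acc.set (pvDigit ch).toNat (acc.getD (pvDigit ch).toNat 0 + 1))
        (List.replicate 10 (0:Int))).getD j 0
      = ((((PySem.Int.toChars N).map pvDigit).count (j : Int) : Nat) : Int) := by
    intro j hj
    rw [counts_getD _ hrange _ (by simp) j hj]
    interval_cases j <;> simp
  by_cases hmem : (0 : Int) ∈ (PySem.Int.toChars N).map pvDigit
  · have hc0 : ¬ (((PySem.Int.toChars N).map pvDigit).contains 0 = false) := by simp [hmem]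
    have hb0 : ¬ (((PySem.Int.toChars N).foldl
        (fun acc ch => acc.set (pvDigit ch).toNat (acc.getD (pvDigit ch).toNat 0 + 1))
        (List.replicate 10 (0:Int))).getD 0 0 = 0) := by
      rw [hcount 0 (by norm_num)]
      have h := List.count_pos_iff.2 hmem
      push_cast
      omega
    rw [if_neg hc0, if_neg hb0]
    simp only [zero_add]
    by_cases hmod : PySem.Int.mod ((PySem.Int.toChars N).map pvDigit).sum 3 ≠ 0
    · rw [if_pos hmod, if_pos hmod]
    · rw [if_neg hmod, if_neg hmod]
      congr 1
      rw [sorted_eq_pvBlocks _ hdr, join_nil_flatten]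
      rw [(by decide : PySem.List.pyRange 9 (-1) (-1) = [9,8,7,6,5,4,3,2,1,0])]
      simp only [List.flatMap_cons, List.flatMap_nil, List.append_nil]
      rw [(by decide : Int.toNat 9 = 9), (by decide : Int.toNat 8 = 8), (by decide : Int.toNat 7 = 7),
          (by decide : Int.toNat 6 = 6), (by decide : Int.toNat 5 = 5), (by decide : Int.toNat 4 = 4),
          (by decide : Int.toNat 3 = 3), (by decide : Int.toNat 2 = 2), (by decide : Int.toNat 1 = 1),
          (by decide : Int.toNat 0 = 0)]
      rw [hcount 9 (by norm_num), hcount 8 (by norm_num), hcount 7 (by norm_num),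
          hcount 6 (by norm_num), hcount 5 (by norm_num), hcount 4 (by norm_num),
          hcount 3 (by norm_num), hcount 2 (by norm_num), hcount 1 (by norm_num),
          hcount 0 (by norm_num)]
      have t9 : PySem.Int.toChars 9 = ['9'] := by decide
      have t8 : PySem.Int.toChars 8 = ['8'] := by decide
      have t7 : PySem.Int.toChars 7 = ['7'] := by decide
      have t6 : PySem.Int.toChars 6 = ['6'] := by decide
      have t5 : PySem.Int.toChars 5 = ['5'] := by decide
      have t4 : PySem.Int.toChars 4 = ['4'] := by decide
      have t3 : PySem.Int.toChars 3 = ['3'] := by decide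
      have t2 : PySem.Int.toChars 2 = ['2'] := by decide
      have t1 : PySem.Int.toChars 1 = ['1'] := by decide
      have t0 : PySem.Int.toChars 0 = ['0'] := by decide
      simp only [pvBlocks, List.map_append, List.map_replicate, t9, t8, t7, t6, t5, t4, t3, t2,
        t1, t0, PySem.List.pyRepeat_singleton, Int.toNat_natCast, List.flatten_append,
        List.flatten_replicate_singleton, List.append_assoc]
      norm_cast
  · have hc0 : (((PySem.Int.toChars N).map pvDigit).contains 0 = false) := by simp [hmem]
    have hb0 : (((PySem.Int.toChars N).foldl
        (fun acc ch => acc.set (pvDigit ch).toNat (acc.getD (pvDigit ch).toNat 0 + 1))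
        (List.replicate 10 (0:Int))).getD 0 0 = 0) := by
      rw [hcount 0 (by norm_num)]
      simp [List.count_eq_zero.2 hmem]
    rw [if_pos hc0, if_pos hb0]
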